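-- pv_equiv track=rewrite | github.com/SevenBitsSwe/MVP | FlinkProcessor/Core/ClickhouseActivityRepository.py | get_activity_for_user
-- ===== SOURCE A (Python) =====
-- def get_activity_for_user(interests, activity_list):
--     activity_list_filtered_for_type = []
--
--     #filtro per tipologia
--     for activity in activity_list:
--         if activity[2] in interests:
--             activity_list_filtered_for_type.append(activity)
--
--     if len(activity_list_filtered_for_type) == 0:
--         return None
--
--     #filtro per distanza
--     activity_min = min(activity_list_filtered_for_type, key=lambda a: a[4])
--
--     return activity_min
-- ===== SOURCE B (Python) =====
-- def get_activity_for_user(interests, activity_list):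
--     best = None
--     for activity in activity_list:
--         if activity[2] in interests and (best is None or activity[4] < best[4]):
--             best = activity
--     return best
-- ===== Notes on version B (the rewrite author's own statement) =====
-- stated objective: simpler
-- what changed: Replaces the two-pass structure (build a filtered list, then min with a key) by a single fused loop that keeps a running best (strict < keeps the first of tied minima, matching min's first-occurrence rule); no intermediate list is built.
import Mathlib
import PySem

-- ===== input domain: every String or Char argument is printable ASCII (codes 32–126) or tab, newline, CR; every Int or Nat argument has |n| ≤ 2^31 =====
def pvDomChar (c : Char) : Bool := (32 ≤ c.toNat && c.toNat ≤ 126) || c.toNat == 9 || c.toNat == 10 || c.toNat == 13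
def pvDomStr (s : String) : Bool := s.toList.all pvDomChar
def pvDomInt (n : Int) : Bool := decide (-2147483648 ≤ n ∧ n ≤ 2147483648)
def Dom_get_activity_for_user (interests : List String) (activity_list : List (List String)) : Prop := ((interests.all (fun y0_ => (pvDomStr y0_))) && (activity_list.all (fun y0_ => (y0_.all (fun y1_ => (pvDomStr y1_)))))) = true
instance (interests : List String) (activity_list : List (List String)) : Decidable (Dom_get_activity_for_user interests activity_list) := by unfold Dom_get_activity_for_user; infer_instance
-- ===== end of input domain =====

-- B fuses A's two passes (filter list, then min with a key) into one running-best loop; objective: simpler, no intermediate list.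

-- ===== PORT A =====
-- filter into a list, early-return None on empty, then min(..., key=lambda a: a[4])
def get_activity_for_user (interests : List String) (activity_list : List (List String)) : Option (List String) :=
  let activity_list_filtered_for_type :=
    activity_list.foldl
      (fun acc activity =>
        if PySem.List.pyGetD activity 2 "" ∈ interests then acc ++ [activity] else acc) []
  if activity_list_filtered_for_type.length = 0 then none
  else PySem.List.min? activity_list_filtered_for_type (fun a => PySem.List.pyGetD a 4 "")

-- ===== PORT B =====
-- single pass with a running best; strict < keeps the first of tied minima
def get_activity_for_user_alt (interests : List String) (activity_list : List (List String)) : Option (List String) :=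
  activity_list.foldl
    (fun best activity =>
      if PySem.List.pyGetD activity 2 "" ∈ interests then
        match best with
        | none => some activity
        | some b =>
          if PySem.List.pyGetD activity 4 "" < PySem.List.pyGetD b 4 "" then some activity
          else some b
      else best) none

-- ===== PRECONDITION & SPEC =====
-- Pre_ excludes exactly the inputs on which Python A raises IndexError: an activity shorter
-- than 3 (activity[2]), or a matching activity shorter than 5 (the min key activity[4]).
def Pre_get_activity_for_user (interests : List String) (activity_list : List (List String)) : Prop :=
  ∀ a ∈ activity_list, 3 ≤ a.length ∧ (PySem.List.pyGetD a 2 "" ∈ interests → 5 ≤ a.length)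
instance (interests : List String) (activity_list : List (List String)) : Decidable (Pre_get_activity_for_user interests activity_list) := by unfold Pre_get_activity_for_user; infer_instance
def pvWitness_get_activity_for_user : List String × List (List String) :=
  (["park"], [["a1", "u", "park", "x", "12"], ["a2", "u", "museum", "y"]])

def Spec_get_activity_for_user (interests : List String) (activity_list : List (List String)) (out : Option (List String)) : Prop := out = get_activity_for_user_alt interests activity_list
instance (interests : List String) (activity_list : List (List String)) (out : Option (List String)) : Decidable (Spec_get_activity_for_user interests activity_list out) := by unfold Spec_get_activity_for_user; infer_instance

-- ===== CLAIM (what is proved, stated in full; the proofs are below) =====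
def Claim_equal_get_activity_for_user : Prop := ∀ (interests : List String) (activity_list : List (List String)), Dom_get_activity_for_user interests activity_list → Pre_get_activity_for_user interests activity_list → Spec_get_activity_for_user interests activity_list (get_activity_for_user interests activity_list)

-- ===== LEMMAS AND PROOFS =====

-- A = B on every input (the Dom/Pre hypotheses are not needed for the value equality)
theorem ports_agree (interests : List String) (activity_list : List (List String)) :
    get_activity_for_user interests activity_list = get_activity_for_user_alt interests activity_list := by
  unfold get_activity_for_user get_activity_for_user_alt
  have hfold :
      activity_list.foldl
        (fun acc activity =>
          if PySem.List.pyGetD activity 2 "" ∈ interests then acc ++ [activity] else acc) [] =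
      activity_list.filter (fun a => decide (PySem.List.pyGetD a 2 "" ∈ interests)) := by
    have := PySem.List.foldl_append_if
      (fun a => decide (PySem.List.pyGetD a 2 "" ∈ interests)) (id : List String → List String)
      activity_list []
    simpa using this
  rw [hfold]
  have hmin :
      PySem.List.min?
        (activity_list.filter (fun a => decide (PySem.List.pyGetD a 2 "" ∈ interests)))
        (fun a => PySem.List.pyGetD a 4 "") =
      activity_list.foldl
        (fun best activity =>
          if PySem.List.pyGetD activity 2 "" ∈ interests then
            match best with
            | none => some activity
            | some b =>
              if PySem.List.pyGetD activity 4 "" < PySem.List.pyGetD b 4 "" then some activity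
              else some b
          else best) none := by
    unfold PySem.List.min?
    rw [List.foldl_filter]
    congr 1
    funext best a
    by_cases hp : PySem.List.pyGetD a 2 "" ∈ interests <;> cases best <;> simp [hp]
  by_cases h :
      (activity_list.filter (fun a => decide (PySem.List.pyGetD a 2 "" ∈ interests))).length = 0
  · rw [if_pos h, ← hmin, List.length_eq_zero_iff.mp h]
    rfl
  · rw [if_neg h, hmin]

-- ===== VERDICT (by name: the statement is the Claim_ definition above) =====
theorem get_activity_for_user_spec : Claim_equal_get_activity_for_user := by
  intro interests activity_list _ _
  exact ports_agree interests activity_list
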